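-- pv_equiv track=rewrite | github.com/HuxleyBerry/advent-of-code | day7/p2.py | compare_bids
-- ===== SOURCE A (Python) =====
-- def count_distinct_cards_in_hand(hand):
--     occur = set()
--     occur_twice = set()
--     for h in hand:
--         if h != "J":
--             if h in occur:
--                 occur_twice.add(h)
--             occur.add(h)
--     return len(occur), len(occur_twice)
--
-- def get_hand_type(hand):
--     occuring, double_occuring = count_distinct_cards_in_hand(hand)
--     if occuring <= 1:
--         return 6 # five of a kind
--     elif occuring == 2:
--         if double_occuring != 2:
--             return 5 # four of a kind
--         else:
--             return 4 # full house
--     elif occuring == 3: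
--         if double_occuring != 2:
--             return 3 # three of a kind
--         else:
--             return 2 # two pair
--     elif occuring == 4:
--         return 1 # one pair
--     else:
--         return 0
--
-- def card_to_num(card):
--     if card == "A":
--         return 14
--     elif card == "K":
--         return 13
--     elif card == "Q":
--         return 12
--     elif card == "T":
--         return 10
--     elif card == "J":
--         return 1
--     else:
--         return int(card)
--
-- def compare_bids(bid1, bid2):
--     hand1, hand2 = bid1[0], bid2[0]
--     type1, type2 = get_hand_type(hand1), get_hand_type(hand2)
--     if type1 > type2:
--         return 1
--     elif type1 < type2:
--         return -1
--     else:
--         for card1, card2 in zip(hand1, hand2):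
--             num1, num2 = card_to_num(card1), card_to_num(card2)
--             if num1 > num2:
--                 return 1
--             elif num1 < num2:
--                 return -1
--         return 0
-- ===== SOURCE B (Python) =====
-- _VALUES = {"0": 0, "1": 1, "2": 2, "3": 3, "4": 4, "5": 5, "6": 6, "7": 7,
--            "8": 8, "9": 9, "T": 10, "J": 1, "Q": 12, "K": 13, "A": 14}
--
-- _RANK = {(2, False): 5, (2, True): 4, (3, False): 3, (3, True): 2,
--          (4, False): 1, (4, True): 1}
--
--
-- def _run_lengths(cards):
--     """Run lengths of a sorted card list, leading run first."""
--     if not cards: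
--         return []
--     n = 1
--     while n < len(cards) and cards[n] == cards[0]:
--         n += 1
--     return [n] + _run_lengths(cards[n:])
--
--
-- def _hand_type(hand):
--     runs = _run_lengths(sorted(c for c in hand if c != "J"))
--     if len(runs) <= 1:
--         return 6  # five of a kind (also the all-joker hand: no runs at all)
--     return _RANK.get((len(runs), sum(1 for r in runs if r >= 2) == 2), 0)
--
--
-- def compare_bids(bid1, bid2):
--     t1, t2 = _hand_type(bid1[0]), _hand_type(bid2[0])
--     if t1 != t2:
--         return 1 if t1 > t2 else -1
--     n = min(len(bid1[0]), len(bid2[0]))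
--     v1 = [_VALUES[c] for c in bid1[0][:n]]
--     v2 = [_VALUES[c] for c in bid2[0][:n]]
--     return (v1 > v2) - (v1 < v2)
-- ===== Notes on version B (the rewrite author's own statement) =====
-- stated objective: alternative
-- what changed: Classifies a hand by sorting its non-joker cards and scanning run lengths, mapping (number of runs, whether exactly two runs have length >= 2) through a rank table, and breaks ties by a single lexicographic comparison of two truncated value lists built from a precomputed card-value dict covering all digits - instead of A's incremental occur/occur_twice set maintenance, if/elif rank chain, and explicit per-card compare loop that parses digits with int().
-- outside the precondition, e.g. on compare_bids(('2X', 0), ('3X', 0)): A returns -1, B raises KeyError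
import Mathlib
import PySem

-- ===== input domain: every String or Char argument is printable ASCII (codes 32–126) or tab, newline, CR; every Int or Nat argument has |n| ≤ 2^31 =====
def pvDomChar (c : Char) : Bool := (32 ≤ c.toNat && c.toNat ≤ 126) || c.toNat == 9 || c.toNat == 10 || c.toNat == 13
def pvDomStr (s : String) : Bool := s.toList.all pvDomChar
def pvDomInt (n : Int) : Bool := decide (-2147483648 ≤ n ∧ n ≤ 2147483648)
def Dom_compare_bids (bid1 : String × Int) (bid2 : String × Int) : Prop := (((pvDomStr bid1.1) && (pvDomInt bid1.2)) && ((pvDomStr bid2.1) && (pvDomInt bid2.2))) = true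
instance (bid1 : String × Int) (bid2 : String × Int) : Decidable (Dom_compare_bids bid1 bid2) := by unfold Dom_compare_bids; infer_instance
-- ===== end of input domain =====

-- B classifies a hand by sorting the non-joker cards and scanning run lengths (mapped through a
-- rank table), and tie-breaks with one lexicographic comparison of truncated value lists from a
-- precomputed card-value dict, instead of A's incremental sets, if/elif chain and compare loop
-- (objective: alternative). Return values only; nothing is mutated.

-- ===== PORT A =====

-- step of A's 'for h in hand' loop: state = (occur, occur_twice)
def cdStep (st : PySem.Set Char × PySem.Set Char) (h : Char) : PySem.Set Char × PySem.Set Char :=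
  if h ≠ 'J' then
    ((PySem.Set.add st.1 h), (if PySem.Set.contains st.1 h then PySem.Set.add st.2 h else st.2))
  else st

def count_distinct_cards_in_hand (hand : List Char) : Int × Int :=
  let st := hand.foldl cdStep (PySem.Set.empty, PySem.Set.empty)
  (PySem.Set.len st.1, PySem.Set.len st.2)

def get_hand_type (hand : List Char) : Int :=
  let p := count_distinct_cards_in_hand hand
  let occuring := p.1
  let double_occuring := p.2
  if occuring ≤ 1 then 6
  else if occuring = 2 then (if double_occuring ≠ 2 then 5 else 4)
  else if occuring = 3 then (if double_occuring ≠ 2 then 3 else 2)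
  else if occuring = 4 then 1
  else 0

-- int(card) ported with PySem.Int.ofChars? (none = ValueError; Python only reaches it on digits, where it returns)
def card_to_num (card : Char) : Int :=
  if card = 'A' then 14
  else if card = 'K' then 13
  else if card = 'Q' then 12
  else if card = 'T' then 10
  else if card = 'J' then 1
  else (PySem.Int.ofChars? [card]).getD 0

-- the tie-break 'for card1, card2 in zip(...)' loop of A
def tieLoopA : List (Char × Char) → Int
  | [] => 0
  | (c1, c2) :: rest =>
    let num1 := card_to_num c1
    let num2 := card_to_num c2
    if num1 > num2 then 1
    else if num1 < num2 then -1
    else tieLoopA rest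

def compare_bids (bid1 : String × Int) (bid2 : String × Int) : Int :=
  let hand1 := bid1.1.toList
  let hand2 := bid2.1.toList
  let type1 := get_hand_type hand1
  let type2 := get_hand_type hand2
  if type1 > type2 then 1
  else if type1 < type2 then -1
  else tieLoopA (hand1.zip hand2)

-- ===== PORT B =====

def valuesTable : PySem.Dict Char Int :=
  PySem.Dict.ofList [('0', 0), ('1', 1), ('2', 2), ('3', 3), ('4', 4), ('5', 5), ('6', 6),
                     ('7', 7), ('8', 8), ('9', 9), ('T', 10), ('J', 1), ('Q', 12), ('K', 13), ('A', 14)]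

def rankTable : PySem.Dict (Int × Bool) Int :=
  PySem.Dict.ofList [((2, false), 5), ((2, true), 4), ((3, false), 3), ((3, true), 2),
                     ((4, false), 1), ((4, true), 1)]

-- _run_lengths: the inner 'while' counts the leading run (n = 1 + length of t's equal prefix),
-- the recursion continues on cards[n:]
def runLengths : List Char → List Int
  | [] => []
  | c :: t =>
    (((t.takeWhile (· == c)).length : Int) + 1) :: runLengths (t.dropWhile (· == c))
termination_by l => l.length
decreasing_by
  simp only [List.length_cons]
  exact Nat.lt_succ_of_le (List.dropWhile_sublist _).length_le

def hand_type_alt (hand : List Char) : Int :=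
  let runs := runLengths (PySem.List.sorted (hand.filter (fun c => c ≠ 'J')) (fun c => c) false)
  if runs.length ≤ 1 then 6
  else
    -- 'sum(1 for r in runs if r >= 2)' is the 0/1-count runs.countP (PySem.List.sum_map_ite_one_zero)
    rankTable.getD ((runs.length : Int), ((runs.countP (fun r => decide ((2 : Int) ≤ r)) : Int) == 2)) 0

-- _VALUES[c]: none = KeyError, excluded by Pre_
def card_value_alt (card : Char) : Int := (valuesTable.get? card).getD 0

-- Python's '<' on int lists (lexicographic, a strict prefix is smaller)
def pyListLt : List Int → List Int → Bool
  | _, [] => false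
  | [], _ :: _ => true
  | x :: xs, y :: ys => decide (x < y) || (x == y && pyListLt xs ys)

def compare_bids_alt (bid1 : String × Int) (bid2 : String × Int) : Int :=
  let t1 := hand_type_alt bid1.1.toList
  let t2 := hand_type_alt bid2.1.toList
  if t1 ≠ t2 then (if t1 > t2 then 1 else -1)
  else
    let n : Int := min (bid1.1.toList.length : Int) (bid2.1.toList.length : Int)
    let v1 := (PySem.List.slice bid1.1.toList none (some n)).map card_value_alt
    let v2 := (PySem.List.slice bid2.1.toList none (some n)).map card_value_alt
    (if pyListLt v2 v1 then 1 else 0) - (if pyListLt v1 v2 then 1 else 0)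

-- ===== PRECONDITION & SPEC =====

-- hand-strength rank, independent helper used ONLY by Pre_ (neither port is in Pre_'s closure)
def pvRank (s : String) : Int :=
  let cs := s.toList.filter (fun c => c ≠ 'J')
  let d := PySem.List.dedup cs
  let n := d.length
  let k := d.countP (fun c => 2 ≤ cs.count c)
  if n ≤ 1 then 6
  else if n = 2 then (if k = 2 then 4 else 5)
  else if n = 3 then (if k = 2 then 2 else 3)
  else if n = 4 then 1 else 0

-- Pre_ excludes the inputs on which A raises ValueError — a hand character outside the 13-card
-- alphabet reached by int(card) when the two hand ranks tie — together with the (rare) pairs of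
-- equally-ranked off-alphabet hands whose tie-break happens to decide on an earlier valid card
-- (there B raises KeyError while A returns; see the cite).
def Pre_compare_bids (bid1 : String × Int) (bid2 : String × Int) : Prop :=
  ((bid1.1.toList.all (fun c => c.isDigit || c ∈ ['A', 'K', 'Q', 'T', 'J']) = true) ∧
   (bid2.1.toList.all (fun c => c.isDigit || c ∈ ['A', 'K', 'Q', 'T', 'J']) = true)) ∨
  pvRank bid1.1 ≠ pvRank bid2.1
instance (bid1 : String × Int) (bid2 : String × Int) : Decidable (Pre_compare_bids bid1 bid2) := by unfold Pre_compare_bids; infer_instance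

def pvWitness_compare_bids : (String × Int) × (String × Int) := (("32T3K", 765), ("T55J5", 684))

def Spec_compare_bids (bid1 : String × Int) (bid2 : String × Int) (out : Int) : Prop := out = compare_bids_alt bid1 bid2
instance (bid1 : String × Int) (bid2 : String × Int) (out : Int) : Decidable (Spec_compare_bids bid1 bid2 out) := by unfold Spec_compare_bids; infer_instance

-- ===== CLAIM (what is proved, stated in full; the proofs are below) =====
def Claim_equal_compare_bids : Prop := ∀ (bid1 : String × Int) (bid2 : String × Int), Dom_compare_bids bid1 bid2 → Pre_compare_bids bid1 bid2 → Spec_compare_bids bid1 bid2 (compare_bids bid1 bid2)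

-- ===== LEMMAS AND PROOFS =====

-- ----- card values agree on the 13-card alphabet Pre_ admits -----

theorem card_eq_pre (c : Char)
    (h : (c.isDigit || decide (c ∈ ['A', 'K', 'Q', 'T', 'J'])) = true) :
    card_to_num c = card_value_alt c := by
  rcases (by simpa using h : c.isDigit = true ∨ c ∈ ['A', 'K', 'Q', 'T', 'J']) with hd | hm
  · have hb : 48 ≤ c.toNat ∧ c.toNat ≤ 57 := by
      simp [Char.isDigit] at hd
      exact ⟨hd.1, hd.2⟩
    obtain ⟨hb1, hb2⟩ := hb
    obtain ⟨n, hn⟩ : ∃ n, c.toNat = n := ⟨_, rfl⟩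
    rw [← Char.ofNat_toNat c, hn]
    rw [hn] at hb1 hb2
    interval_cases n <;> decide
  · fin_cases hm <;> decide

-- ----- the two tie-breaks agree -----

theorem pyListLt_cons (x y : Int) (xs ys : List Int) :
    pyListLt (x :: xs) (y :: ys) = (decide (x < y) || (x == y && pyListLt xs ys)) := rfl

theorem tie_lex (l1 l2 : List Char)
    (h1 : ∀ c ∈ l1, card_to_num c = card_value_alt c)
    (h2 : ∀ c ∈ l2, card_to_num c = card_value_alt c) :
    tieLoopA (l1.zip l2) =
      (if pyListLt ((l2.take (min l1.length l2.length)).map card_value_alt)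
                   ((l1.take (min l1.length l2.length)).map card_value_alt) then 1 else 0)
      - (if pyListLt ((l1.take (min l1.length l2.length)).map card_value_alt)
                     ((l2.take (min l1.length l2.length)).map card_value_alt) then 1 else 0) := by
  induction l1 generalizing l2 with
  | nil => simp [tieLoopA, pyListLt]
  | cons c1 t1 ih =>
    cases l2 with
    | nil => simp [tieLoopA, pyListLt]
    | cons c2 t2 =>
      have e1 : card_to_num c1 = card_value_alt c1 := h1 c1 (List.mem_cons_self ..)
      have e2 : card_to_num c2 = card_value_alt c2 := h2 c2 (List.mem_cons_self ..)
      have h1' : ∀ c ∈ t1, card_to_num c = card_value_alt c :=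
        fun c hc => h1 c (List.mem_cons_of_mem _ hc)
      have h2' : ∀ c ∈ t2, card_to_num c = card_value_alt c :=
        fun c hc => h2 c (List.mem_cons_of_mem _ hc)
      have hmin : min (c1 :: t1).length (c2 :: t2).length = min t1.length t2.length + 1 := by
        simp only [List.length_cons]; omega
      rw [show (c1 :: t1).zip (c2 :: t2) = (c1, c2) :: t1.zip t2 from rfl]
      rw [show tieLoopA ((c1, c2) :: t1.zip t2)
            = (if card_to_num c1 > card_to_num c2 then 1
               else if card_to_num c1 < card_to_num c2 then -1
               else tieLoopA (t1.zip t2)) from rfl]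
      rw [e1, e2, hmin, List.take_succ_cons, List.take_succ_cons, List.map_cons, List.map_cons,
          pyListLt_cons, pyListLt_cons]
      rcases lt_trichotomy (card_value_alt c1) (card_value_alt c2) with hlt | heq | hgt
      · rw [if_neg (by omega), if_pos hlt,
            decide_eq_false (show ¬ card_value_alt c2 < card_value_alt c1 by omega),
            decide_eq_true hlt,
            beq_eq_false_iff_ne.mpr (show card_value_alt c2 ≠ card_value_alt c1 by omega)]
        simp
      · rw [if_neg (by omega), if_neg (by omega),
            decide_eq_false (show ¬ card_value_alt c2 < card_value_alt c1 by omega),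
            decide_eq_false (show ¬ card_value_alt c1 < card_value_alt c2 by omega),
            beq_iff_eq.mpr heq.symm, beq_iff_eq.mpr heq]
        simp only [Bool.false_or, Bool.true_and]
        exact ih t2 h1' h2'
      · rw [if_pos hgt,
            decide_eq_true (show card_value_alt c2 < card_value_alt c1 from hgt),
            decide_eq_false (show ¬ card_value_alt c1 < card_value_alt c2 by omega),
            beq_eq_false_iff_ne.mpr (show card_value_alt c1 ≠ card_value_alt c2 by omega)]
        simp

-- ----- runs of a sorted list: heads and counts (proof-only helpers) -----

-- run heads of a grouped list: mirror of runLengths's recursion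
def runHeads : List Char → List Char
  | [] => []
  | c :: t => c :: runHeads (t.dropWhile (· == c))
termination_by l => l.length
decreasing_by
  simp only [List.length_cons]
  exact Nat.lt_succ_of_le (List.dropWhile_sublist _).length_le

theorem not_mem_dropWhile_head (c : Char) (t : List Char)
    (hl : (c :: t).Pairwise (· ≤ ·)) : c ∉ t.dropWhile (· == c) := by
  intro hmem
  cases h : t.dropWhile (· == c) with
  | nil => rw [h] at hmem; simp at hmem
  | cons r0 r' =>
    have hp0 : (r0 == c) = false := by
      have hh := List.head?_dropWhile_not (· == c) t
      rw [h] at hh; simpa using hh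
    have hr0c : r0 ≠ c := by simpa using hp0
    have hsub : List.Sublist (t.dropWhile (· == c)) t := List.dropWhile_sublist _
    have hrest_pw : (t.dropWhile (· == c)).Pairwise (· ≤ ·) :=
      List.Pairwise.sublist hsub (List.pairwise_cons.mp hl).2
    have hc_le : ∀ x ∈ t, c ≤ x := (List.pairwise_cons.mp hl).1
    rw [h] at hmem
    rcases List.mem_cons.mp hmem with h' | hmem'
    · exact hr0c h'.symm
    · have hle1 : r0 ≤ c := by
        rw [h] at hrest_pw
        exact (List.pairwise_cons.mp hrest_pw).1 c hmem'
      have hle2 : c ≤ r0 := hc_le r0 (hsub.subset (by rw [h]; exact List.mem_cons_self ..))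
      exact hr0c (le_antisymm hle1 hle2)

theorem count_head_run (c : Char) (t : List Char)
    (hl : (c :: t).Pairwise (· ≤ ·)) :
    (c :: t).count c = (t.takeWhile (· == c)).length + 1 := by
  have hsplit : t.takeWhile (· == c) ++ t.dropWhile (· == c) = t :=
    List.takeWhile_append_dropWhile
  have htake : (t.takeWhile (· == c)).count c = (t.takeWhile (· == c)).length :=
    List.count_eq_length.mpr (fun b hb => by
      have hbc := List.mem_takeWhile_imp hb
      simp at hbc
      exact hbc.symm)
  have hdrop : (t.dropWhile (· == c)).count c = 0 :=
    List.count_eq_zero.mpr (not_mem_dropWhile_head c t hl)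
  calc (c :: t).count c = t.count c + 1 := List.count_cons_self ..
    _ = (t.takeWhile (· == c) ++ t.dropWhile (· == c)).count c + 1 := by rw [hsplit]
    _ = (t.takeWhile (· == c)).length + 1 := by
        rw [List.count_append, htake, hdrop]

theorem runHeads_subset (l : List Char) : ∀ x ∈ runHeads l, x ∈ l := by
  induction l using runHeads.induct with
  | case1 => intro x hx; simp [runHeads] at hx
  | case2 c t ih =>
    intro x hx
    rw [runHeads] at hx
    rcases List.mem_cons.mp hx with rfl | hx'
    · exact List.mem_cons_self ..
    · exact List.mem_cons_of_mem _ ((List.dropWhile_sublist _).subset (ih x hx'))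

theorem mem_runHeads (l : List Char) :
    l.Pairwise (· ≤ ·) → ∀ x : Char, (x ∈ runHeads l ↔ x ∈ l) := by
  induction l using runHeads.induct with
  | case1 => intro _ x; simp [runHeads]
  | case2 c t ih =>
    intro hl x
    have hrest_pw : (t.dropWhile (· == c)).Pairwise (· ≤ ·) :=
      List.Pairwise.sublist (List.dropWhile_sublist _) (List.pairwise_cons.mp hl).2
    rw [runHeads]
    simp only [List.mem_cons, ih hrest_pw x]
    constructor
    · rintro (rfl | hx)
      · exact Or.inl rfl
      · exact Or.inr ((List.dropWhile_sublist _).subset hx)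
    · rintro (rfl | hx)
      · exact Or.inl rfl
      · rw [← List.takeWhile_append_dropWhile (p := (· == c)) (l := t)] at hx
        rcases List.mem_append.mp hx with hx1 | hx2
        · left
          have := List.mem_takeWhile_imp hx1
          simpa using this
        · exact Or.inr hx2

theorem nodup_runHeads (l : List Char) :
    l.Pairwise (· ≤ ·) → (runHeads l).Nodup := by
  induction l using runHeads.induct with
  | case1 => intro _; simp [runHeads]
  | case2 c t ih =>
    intro hl
    have hrest_pw : (t.dropWhile (· == c)).Pairwise (· ≤ ·) :=
      List.Pairwise.sublist (List.dropWhile_sublist _) (List.pairwise_cons.mp hl).2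
    rw [runHeads]
    refine List.nodup_cons.mpr ⟨?_, ih hrest_pw⟩
    intro hc
    exact not_mem_dropWhile_head c t hl ((mem_runHeads _ hrest_pw c).mp hc)

theorem runLengths_eq_map (l : List Char) :
    l.Pairwise (· ≤ ·) → runLengths l = (runHeads l).map (fun c => (l.count c : Int)) := by
  induction l using runLengths.induct with
  | case1 => intro _; simp [runLengths, runHeads]
  | case2 c t ih =>
    intro hl
    have hrest_pw : (t.dropWhile (· == c)).Pairwise (· ≤ ·) :=
      List.Pairwise.sublist (List.dropWhile_sublist _) (List.pairwise_cons.mp hl).2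
    rw [runLengths, runHeads, List.map_cons, ih hrest_pw]
    refine List.cons_eq_cons.mpr ⟨?_, ?_⟩
    · rw [count_head_run c t hl]; push_cast; ring
    · refine List.map_congr_left ?_
      intro x hx
      have hxrest : x ∈ t.dropWhile (· == c) := runHeads_subset _ x hx
      have hxc : x ≠ c := fun h => not_mem_dropWhile_head c t hl (h ▸ hxrest)
      have hcnt1 : (c :: t).count x = t.count x := by
        simp only [List.count_cons, beq_iff_eq]
        rw [if_neg (fun hh : c = x => hxc hh.symm)]
        omega
      have hcnt2 : (t.takeWhile (· == c)).count x = 0 :=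
        List.count_eq_zero.mpr (fun hmem => by
          have := List.mem_takeWhile_imp hmem
          simp at this
          exact hxc this)
      have hcnt3 : t.count x = (t.dropWhile (· == c)).count x := by
        conv_lhs => rw [← List.takeWhile_append_dropWhile (p := (· == c)) (l := t)]
        rw [List.count_append, hcnt2]
        omega
      rw [hcnt1, hcnt3]

-- ----- A-side characterisation of the two set counters -----

theorem cdFold_fst (l : List Char) (o t : PySem.Set Char) :
    (l.foldl cdStep (o, t)).1 = PySem.Set.update o (l.filter (fun c => c ≠ 'J')) := by
  induction l generalizing o t with
  | nil => simp [PySem.Set.update_nil]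
  | cons h l ih =>
    by_cases hJ : h = 'J'
    · subst hJ; simp [cdStep, List.foldl_cons, ih]
    · simp only [List.foldl_cons, cdStep, if_pos hJ, List.filter_cons]
      simp [ih, PySem.Set.update_cons, hJ]

theorem cdFold_snd_mem (l : List Char) (o t : PySem.Set Char) (c : Char) :
    c ∈ (l.foldl cdStep (o, t)).2 ↔
      c ∈ t ∨ (c ≠ 'J' ∧ c ∈ l ∧ (c ∈ o ∨ 2 ≤ l.count c)) := by
  induction l generalizing o t with
  | nil => simp
  | cons h l ih =>
    by_cases hJ : h = 'J'
    · subst hJ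
      simp only [List.foldl_cons, cdStep, ite_not, ih]
      by_cases hc : c = 'J'
      · simp [hc]
      · simp [hc, Ne.symm hc]
    · simp only [List.foldl_cons, cdStep, if_pos hJ, ih]
      by_cases hc : c = h
      · subst hc
        have hcount : (2 ≤ List.count c (c :: l)) ↔ (1 ≤ List.count c l) := by
          rw [List.count_cons_self]; omega
        have hmc : (1 ≤ List.count c l) ↔ c ∈ l := List.one_le_count_iff
        by_cases hoc : c ∈ o
        · simp [hoc, PySem.Set.mem_add, hJ]
        · simp [hoc, hJ, hmc]
      · have hcnt : List.count c (h :: l) = List.count c l := by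
          simp [Ne.symm hc]
        by_cases hoc : h ∈ o
        · simp [hoc, PySem.Set.mem_add, hc, hcnt]
        · simp [hoc, hc, hcnt]

theorem cdFold_snd_nodup (l : List Char) (o t : PySem.Set Char) (ht : t.Nodup) :
    (l.foldl cdStep (o, t)).2.Nodup := by
  induction l generalizing o t with
  | nil => exact ht
  | cons h l ih =>
    by_cases hJ : h = 'J'
    · subst hJ; simpa [cdStep] using ih o t ht
    · simp only [List.foldl_cons, cdStep, if_pos hJ]
      split_ifs with ho
      · exact ih _ _ (PySem.Set.nodup_add _ _ ht)
      · exact ih _ _ ht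

theorem twice_len (l : List Char) :
    (l.foldl cdStep (PySem.Set.empty, PySem.Set.empty)).2.length
      = ((PySem.Set.ofList (l.filter (fun c => c ≠ 'J'))).filter
          (fun c => decide (2 ≤ (l.filter (fun c => c ≠ 'J')).count c))).length := by
  have hnd1 : (l.foldl cdStep (PySem.Set.empty, PySem.Set.empty)).2.Nodup :=
    cdFold_snd_nodup l _ _ List.nodup_nil
  have hnd2 : ((PySem.Set.ofList (l.filter (fun c => c ≠ 'J'))).filter
      (fun c => decide (2 ≤ (l.filter (fun c => c ≠ 'J')).count c))).Nodup :=
    (PySem.Set.nodup_ofList _).filter _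
  refine List.Perm.length_eq ?_
  rw [List.perm_ext_iff_of_nodup hnd1 hnd2]
  intro c
  rw [cdFold_snd_mem]
  by_cases hc : c = 'J'
  · subst hc
    simp [PySem.Set.mem_ofList, List.mem_filter]
  · have hcnt : (l.filter (fun c => c ≠ 'J')).count c = l.count c :=
      List.count_filter (by simp [hc])
    simp only [PySem.Set.mem_ofList, List.mem_filter, hcnt, hc, decide_eq_true_eq,
      ne_eq, not_false_iff, decide_true]
    simp only [PySem.Set.empty, List.not_mem_nil, false_or, true_and, and_true]

-- ----- A's if/elif chain vs B's rank table -----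

theorem table_none (m : Int) (b : Bool) (hm : 5 ≤ m) : rankTable.getD (m, b) 0 = 0 := by
  have h : rankTable = PySem.Dict.mk [((2, false), 5), ((2, true), 4), ((3, false), 3),
      ((3, true), 2), ((4, false), 1), ((4, true), 1)] := by decide
  rw [h, PySem.Dict.getD_eq_get?_getD]
  simp only [PySem.Dict.get?_mk_cons, beq_iff_eq, Prod.mk.injEq]
  split_ifs <;> first | rfl | omega

theorem chain_table (n k : Nat) :
    (if (n : Int) ≤ 1 then (6 : Int)
     else if (n : Int) = 2 then (if (k : Int) ≠ 2 then 5 else 4)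
     else if (n : Int) = 3 then (if (k : Int) ≠ 2 then 3 else 2)
     else if (n : Int) = 4 then 1 else 0)
    = (if n ≤ 1 then 6 else rankTable.getD ((n : Int), ((k : Int) == 2)) 0) := by
  by_cases hk : k = 2
  · subst hk
    match n with
    | 0 => decide
    | 1 => decide
    | 2 => decide
    | 3 => decide
    | 4 => decide
    | (m + 5) =>
      rw [if_neg (by push_cast; omega), if_neg (by push_cast; omega),
          if_neg (by push_cast; omega), if_neg (by push_cast; omega),
          if_neg (by omega), table_none _ _ (by push_cast; omega)]
  · have hki : ¬((k : Int) = 2) := fun h => hk (by exact_mod_cast h)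
    have hb : ((k : Int) == 2) = false := by simpa using hki
    rw [hb]
    match n with
    | 0 => rfl
    | 1 => rfl
    | 2 => rw [if_neg (by omega), if_pos (by norm_num), if_pos hki, if_neg (by omega)]; decide
    | 3 => rw [if_neg (by omega), if_neg (by omega), if_pos (by norm_num), if_pos hki,
               if_neg (by omega)]; decide
    | 4 => rw [if_neg (by omega), if_neg (by omega), if_neg (by omega), if_pos (by norm_num),
               if_neg (by omega)]; decide
    | (m + 5) =>
      rw [if_neg (by push_cast; omega), if_neg (by push_cast; omega),
          if_neg (by push_cast; omega), if_neg (by push_cast; omega),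
          if_neg (by omega), table_none _ _ (by push_cast; omega)]

-- ----- the two classifiers agree -----

theorem sorted_len_eq (hand : List Char) :
    (runLengths (PySem.List.sorted (hand.filter (fun c => c ≠ 'J')) (fun c => c) false)).length
      = (PySem.Set.ofList (hand.filter (fun c => c ≠ 'J'))).length := by
  have hpw := PySem.List.sorted_pairwise (hand.filter (fun c => c ≠ 'J')) (fun c => c)
  have hperm := PySem.List.sorted_perm (hand.filter (fun c => c ≠ 'J')) (fun c => c) false
  have hndH := nodup_runHeads _ hpw
  have hpermH : (runHeads (PySem.List.sorted (hand.filter (fun c => c ≠ 'J')) (fun c => c) false)).Perm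
      (PySem.Set.ofList (hand.filter (fun c => c ≠ 'J'))) := by
    rw [List.perm_ext_iff_of_nodup hndH (PySem.Set.nodup_ofList _)]
    intro x
    rw [mem_runHeads _ hpw x, PySem.Set.mem_ofList]
    exact hperm.mem_iff
  rw [runLengths_eq_map _ hpw, List.length_map]
  exact hpermH.length_eq

theorem sorted_cnt_eq (hand : List Char) :
    (runLengths (PySem.List.sorted (hand.filter (fun c => c ≠ 'J')) (fun c => c) false)).countP
        (fun r => decide ((2 : Int) ≤ r))
      = ((PySem.Set.ofList (hand.filter (fun c => c ≠ 'J'))).filter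
          (fun c => decide (2 ≤ (hand.filter (fun c => c ≠ 'J')).count c))).length := by
  have hpw := PySem.List.sorted_pairwise (hand.filter (fun c => c ≠ 'J')) (fun c => c)
  have hperm := PySem.List.sorted_perm (hand.filter (fun c => c ≠ 'J')) (fun c => c) false
  have hndH := nodup_runHeads _ hpw
  have hpermH : (runHeads (PySem.List.sorted (hand.filter (fun c => c ≠ 'J')) (fun c => c) false)).Perm
      (PySem.Set.ofList (hand.filter (fun c => c ≠ 'J'))) := by
    rw [List.perm_ext_iff_of_nodup hndH (PySem.Set.nodup_ofList _)]
    intro x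
    rw [mem_runHeads _ hpw x, PySem.Set.mem_ofList]
    exact hperm.mem_iff
  rw [runLengths_eq_map _ hpw, List.countP_map, ← List.countP_eq_length_filter,
      ← hpermH.countP_eq]
  refine List.countP_congr ?_
  intro x _
  simp only [Function.comp_apply, hperm.count_eq x, decide_eq_true_eq]
  omega

theorem type_eq (hand : List Char) : get_hand_type hand = hand_type_alt hand := by
  have hupd : ∀ xs : List Char, PySem.Set.update PySem.Set.empty xs = PySem.Set.ofList xs := by
    intro xs; rw [PySem.Set.ofList_eq_foldl]; rfl
  unfold get_hand_type count_distinct_cards_in_hand hand_type_alt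
  simp only [cdFold_fst, hupd, PySem.Set.len, twice_len, sorted_len_eq, sorted_cnt_eq]
  exact chain_table _ _

-- pvRank computes exactly A's hand type (used to discharge Pre_'s second disjunct)
theorem rank_eq (s : String) : pvRank s = get_hand_type s.toList := by
  have hupd : ∀ xs : List Char, PySem.Set.update PySem.Set.empty xs = PySem.Set.ofList xs := by
    intro xs; rw [PySem.Set.ofList_eq_foldl]; rfl
  unfold pvRank get_hand_type count_distinct_cards_in_hand
  simp only [cdFold_fst, hupd, PySem.Set.len, twice_len, PySem.List.dedup_eq_ofList,
    List.countP_eq_length_filter]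
  split_ifs <;> first | rfl | omega

-- ===== VERDICT (by name: the statement is the Claim_ definition above) =====
theorem compare_bids_spec : Claim_equal_compare_bids := by
  intro bid1 bid2 _ hpre
  unfold Spec_compare_bids
  simp only [compare_bids, compare_bids_alt, type_eq]
  rcases lt_trichotomy (hand_type_alt bid1.1.toList) (hand_type_alt bid2.1.toList) with h | h | h
  · rw [if_neg (by omega), if_pos h, if_pos (by omega), if_neg (by omega)]
  · -- tie: the hand types agree, so Pre_'s second disjunct is impossible
    have halpha : (bid1.1.toList.all (fun c => c.isDigit || c ∈ ['A', 'K', 'Q', 'T', 'J']) = true) ∧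
        (bid2.1.toList.all (fun c => c.isDigit || c ∈ ['A', 'K', 'Q', 'T', 'J']) = true) := by
      rcases hpre with hok | hne
      · exact hok
      · exfalso; apply hne
        rw [rank_eq, rank_eq, type_eq, type_eq, h]
    rw [if_neg (by omega), if_neg (by omega), if_neg (by omega)]
    have hc1 : ∀ c ∈ bid1.1.toList, card_to_num c = card_value_alt c := by
      intro c hc
      exact card_eq_pre c (by simpa using List.all_eq_true.mp halpha.1 c hc)
    have hc2 : ∀ c ∈ bid2.1.toList, card_to_num c = card_value_alt c := by
      intro c hc
      exact card_eq_pre c (by simpa using List.all_eq_true.mp halpha.2 c hc)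
    have hm : (min ((bid1.1.toList.length : Int)) ((bid2.1.toList.length : Int))).toNat
        = min bid1.1.toList.length bid2.1.toList.length := by omega
    have hs1 : PySem.List.slice bid1.1.toList none
          (some (min ((bid1.1.toList.length : Int)) ((bid2.1.toList.length : Int))))
        = bid1.1.toList.take (min bid1.1.toList.length bid2.1.toList.length) := by
      rw [PySem.List.slice_to bid1.1.toList
        (by omega : (0 : Int) ≤ min ((bid1.1.toList.length : Int)) ((bid2.1.toList.length : Int))), hm]
    have hs2 : PySem.List.slice bid2.1.toList none
          (some (min ((bid1.1.toList.length : Int)) ((bid2.1.toList.length : Int))))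
        = bid2.1.toList.take (min bid1.1.toList.length bid2.1.toList.length) := by
      rw [PySem.List.slice_to bid2.1.toList
        (by omega : (0 : Int) ≤ min ((bid1.1.toList.length : Int)) ((bid2.1.toList.length : Int))), hm]
    rw [hs1, hs2]
    exact tie_lex bid1.1.toList bid2.1.toList hc1 hc2
  · rw [if_pos h, if_pos (by omega), if_pos (by omega)]
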